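-- pv_equiv track=rewrite | github.com/xmu-hph/mybus_cor | all_code/timetable.py | split_into_time_dict
-- ===== SOURCE A (Python) =====
-- from collections import defaultdict
--
-- def split_into_time_dict(data):
--     min_times = defaultdict(lambda: '24:24:24')  # 初始化为正无穷大
--     # 遍历数据并更新每个站点的最小时间
--     for time, station in data:
--         if time < min_times[station]:
--             min_times[station] = time
--     # 将字典中的值转换为列表
--     result1 = [(time, station) for station, time in min_times.items()]
--     # 根据站点编号排序
--     result1.sort(key=lambda x: x[1])
--     return result1
-- ===== SOURCE B (Python) =====
-- def split_into_time_dict(data):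
--     # collect-then-reduce: group all times per station, then take each group's
--     # minimum seeded with the '24:24:24' cap, and sort the pairs by station
--     groups = {}
--     for time, station in data:
--         groups.setdefault(station, []).append(time)
--     return sorted(((min(['24:24:24'] + times), station)
--                    for station, times in groups.items()),
--                   key=lambda p: p[1])
-- ===== Notes on version B (the rewrite author's own statement) =====
-- stated objective: alternative
-- what changed: Replaces A's fused defaultdict running-min loop by a collect-then-reduce decomposition: one grouping pass collecting every time per station, then each group is reduced to min(['24:24:24'] + times) and the (min, station) pairs are sorted by station.
import Mathlib
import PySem

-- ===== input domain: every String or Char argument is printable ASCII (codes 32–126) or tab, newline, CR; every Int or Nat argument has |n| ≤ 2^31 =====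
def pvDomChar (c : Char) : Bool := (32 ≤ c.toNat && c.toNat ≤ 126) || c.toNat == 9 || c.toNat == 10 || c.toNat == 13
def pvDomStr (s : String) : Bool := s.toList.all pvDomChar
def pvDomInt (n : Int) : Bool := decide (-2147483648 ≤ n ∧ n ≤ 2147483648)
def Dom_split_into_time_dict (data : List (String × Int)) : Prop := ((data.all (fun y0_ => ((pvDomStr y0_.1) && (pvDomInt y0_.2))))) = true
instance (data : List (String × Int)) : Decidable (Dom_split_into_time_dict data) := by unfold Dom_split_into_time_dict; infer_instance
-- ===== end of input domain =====

-- B replaces A's fused running-min loop by a collect-then-reduce decomposition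
-- (group all times per station, then take each group's seeded minimum): an
-- alternative of the same cost, proved to return the same list.


-- ===== PORT A =====
-- one iteration of A's loop: `min_times[station]` on a defaultdict inserts the
-- default '24:24:24' on first access (setdefault), then the running min updates
def pvStepA (d : PySem.Dict Int String) (p : String × Int) : PySem.Dict Int String :=
  if p.1 < (d.setdefault p.2 "24:24:24").getD p.2 "24:24:24" then
    (d.setdefault p.2 "24:24:24").insert p.2 p.1
  else d.setdefault p.2 "24:24:24"

def split_into_time_dict (data : List (String × Int)) : List (String × Int) :=
  PySem.List.sorted
    ((data.foldl pvStepA PySem.Dict.empty).items.map (fun p => (p.2, p.1)))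
    (fun x => x.2)

-- ===== PORT B =====
-- one iteration of B's grouping loop: groups.setdefault(station, []).append(time)
def pvStepB (g : PySem.Dict Int (List String)) (p : String × Int) : PySem.Dict Int (List String) :=
  g.modify p.2 [] (· ++ [p.1])

def split_into_time_dict_alt (data : List (String × Int)) : List (String × Int) :=
  PySem.List.sorted
    ((data.foldl pvStepB PySem.Dict.empty).items.map (fun p =>
      ((PySem.List.min? ("24:24:24" :: p.2) (fun y => y)).getD "24:24:24", p.1)))
    (fun q => q.2)

-- ===== PRECONDITION & SPEC =====
def Spec_split_into_time_dict (data : List (String × Int)) (out : List (String × Int)) : Prop := out = split_into_time_dict_alt data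
instance (data : List (String × Int)) (out : List (String × Int)) : Decidable (Spec_split_into_time_dict data out) := by unfold Spec_split_into_time_dict; infer_instance

-- ===== CLAIM (what is proved, stated in full; the proofs are below) =====
def Claim_equal_split_into_time_dict : Prop := ∀ (data : List (String × Int)), Dom_split_into_time_dict data → Spec_split_into_time_dict data (split_into_time_dict data)

-- ===== LEMMAS AND PROOFS =====

-- the invariant tying A's running-min dict to B's groups dict
def pvRel (d : PySem.Dict Int String) (g : PySem.Dict Int (List String)) : Prop :=
  d.keys = g.keys ∧ d.keys.Nodup ∧
    ∀ st, d.getD st "24:24:24" = (g.getD st []).foldl min "24:24:24"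

lemma pvStepA_keys (d : PySem.Dict Int String) (p : String × Int) :
    (pvStepA d p).keys = if d.contains p.2 then d.keys else d.keys ++ [p.2] := by
  have hsd : (d.setdefault p.2 "24:24:24").contains p.2 = true := by
    simp [PySem.Dict.contains_setdefault]
  unfold pvStepA
  split
  · rw [PySem.Dict.keys_insert_of_contains _ _ hsd, PySem.Dict.keys_setdefault]
  · rw [PySem.Dict.keys_setdefault]

lemma pvStepB_keys (g : PySem.Dict Int (List String)) (p : String × Int) :
    (pvStepB g p).keys = if g.contains p.2 then g.keys else g.keys ++ [p.2] := by
  unfold pvStepB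
  rw [PySem.Dict.keys_modify]
  by_cases hc : g.contains p.2 = true
  · rw [PySem.Dict.keys_insert_of_contains _ _ hc]; simp [hc]
  · rw [PySem.Dict.keys_insert_of_not_contains _ _ (by simpa using hc)]
    simp [hc]

lemma pvStepA_getD (d : PySem.Dict Int String) (p : String × Int) (st : Int) :
    (pvStepA d p).getD st "24:24:24" =
      if st = p.2 then
        (if p.1 < d.getD p.2 "24:24:24" then p.1 else d.getD p.2 "24:24:24")
      else d.getD st "24:24:24" := by
  unfold pvStepA
  by_cases h : st = p.2
  · subst h
    rw [PySem.Dict.getD_setdefault_self]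
    split
    · simp
    · rw [PySem.Dict.getD_setdefault_self, if_pos rfl]
  · simp only [h, if_false]
    have hsd : (d.setdefault p.2 "24:24:24").getD st "24:24:24" = d.getD st "24:24:24" := by
      rw [PySem.Dict.getD_eq_get?_getD, PySem.Dict.get?_setdefault_of_ne _ _ h,
        ← PySem.Dict.getD_eq_get?_getD]
    split
    · rw [PySem.Dict.getD_insert]; simp [h, hsd]
    · exact hsd

lemma pvMin_append (x t : String) (ts : List String) :
    (ts ++ [t]).foldl min x =
      if t < ts.foldl min x then t else ts.foldl min x := by
  rw [List.foldl_append]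
  simp only [List.foldl_cons, List.foldl_nil]
  by_cases h : t < ts.foldl min x
  · simp [h, min_eq_right (le_of_lt h)]
  · simp [h, min_eq_left (not_lt.mp h)]

lemma pvRel_step (d : PySem.Dict Int String) (g : PySem.Dict Int (List String))
    (p : String × Int) (h : pvRel d g) : pvRel (pvStepA d p) (pvStepB g p) := by
  obtain ⟨hk, hnd, hv⟩ := h
  have hcont : d.contains p.2 = g.contains p.2 := by
    rw [PySem.Dict.contains_eq_decide_mem_keys, PySem.Dict.contains_eq_decide_mem_keys, hk]
  refine ⟨?_, ?_, ?_⟩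
  · rw [pvStepA_keys, pvStepB_keys, hk, hcont]
  · rw [pvStepA_keys]
    by_cases hc : d.contains p.2 = true
    · simpa [hc] using hnd
    · have hmem : p.2 ∉ d.keys := by
        intro hm
        exact hc ((PySem.Dict.contains_iff_mem_keys d p.2).mpr hm)
      rw [if_neg hc]
      rw [List.nodup_append]
      refine ⟨hnd, List.nodup_singleton _, ?_⟩
      intro a ha b hb
      rw [List.mem_singleton] at hb
      intro hab
      exact hmem (hb ▸ hab ▸ ha)
  · intro st
    rw [pvStepA_getD]
    have hgB : (pvStepB g p).getD st [] =
        if st = p.2 then g.getD p.2 [] ++ [p.1] else g.getD st [] := by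
      unfold pvStepB
      rw [PySem.Dict.getD_modify]
    rw [hgB]
    by_cases h : st = p.2
    · simp only [h, if_true, hv p.2, pvMin_append]
    · simp [h, hv st]

lemma pvRel_foldl (l : List (String × Int)) :
    ∀ (d : PySem.Dict Int String) (g : PySem.Dict Int (List String)),
      pvRel d g → pvRel (l.foldl pvStepA d) (l.foldl pvStepB g) := by
  induction l with
  | nil => intro d g h; exact h
  | cons p t ih => intro d g h; exact ih _ _ (pvRel_step d g p h)

-- ===== VERDICT (by name: the statement is the Claim_ definition above) =====
theorem split_into_time_dict_spec : Claim_equal_split_into_time_dict := by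
  intro data _
  unfold Spec_split_into_time_dict split_into_time_dict split_into_time_dict_alt
  have hrel : pvRel (data.foldl pvStepA PySem.Dict.empty)
      (data.foldl pvStepB PySem.Dict.empty) := by
    apply pvRel_foldl
    refine ⟨by simp [PySem.Dict.keys_empty], by simp [PySem.Dict.keys_empty], ?_⟩
    intro st; simp [PySem.Dict.getD_empty]
  obtain ⟨hk, hnd, hv⟩ := hrel
  have hndB : (data.foldl pvStepB PySem.Dict.empty).keys.Nodup := hk ▸ hnd
  rw [PySem.Dict.items_eq_map_keys _ hnd "24:24:24",
    PySem.Dict.items_eq_map_keys _ hndB []]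
  rw [List.map_map, List.map_map, ← hk]
  congr 1
  refine List.map_congr_left ?_
  intro k _
  simp only [Function.comp]
  rw [PySem.List.min?_id_cons, Option.getD_some, hv k]
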